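-- pv_equiv track=rewrite | github.com/momstouch/programming | hackerrank/interview_preparation_kit/04_dictionaries_and_hashmaps/sherlock_and_anagrams.py | sherlockAndAnagrams
-- ===== SOURCE A (Python) =====
-- from collections import Counter
--
-- def sherlockAndAnagrams(s):
--     bucket = {}
--
--     for i in range(len(s)):
--         for j in range(1, len(s) - i + 1):
--             key = frozenset(Counter(s[i: i + j]).items())
--             bucket[key] = bucket.get(key, 0) + 1
--     ans = 0
--     for key in bucket.keys():
--         ans += (bucket[key] * (bucket[key] - 1)) // 2
--
--     return ans
-- ===== SOURCE B (Python) =====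
-- def sherlockAndAnagrams(s):
--     # Direct pair counting: for each ordered pair of start positions i < j, extend
--     # both substrings one character at a time while maintaining a signed
--     # character-count difference; the pair of substrings of the current length is
--     # an anagram pair exactly when every difference is zero.  No bucket/grouping.
--     n = len(s)
--     ans = 0
--     for i in range(n):
--         for j in range(i + 1, n):
--             diff = {}
--             for l in range(n - j):
--                 diff[s[i + l]] = diff.get(s[i + l], 0) + 1
--                 diff[s[j + l]] = diff.get(s[j + l], 0) - 1
--                 if all(v == 0 for v in diff.values()):
--                     ans += 1
--     return ans
-- ===== Notes on version B (the rewrite author's own statement) =====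
-- stated objective: alternative
-- what changed: B abandons A's hash-bucket-of-multiset-keys plus sum of C(v,2) entirely: it counts anagram pairs directly, iterating over pairs of start positions and extending both substrings in lockstep while maintaining a signed character-count difference dictionary, counting a pair whenever all differences are zero.
import Mathlib
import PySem

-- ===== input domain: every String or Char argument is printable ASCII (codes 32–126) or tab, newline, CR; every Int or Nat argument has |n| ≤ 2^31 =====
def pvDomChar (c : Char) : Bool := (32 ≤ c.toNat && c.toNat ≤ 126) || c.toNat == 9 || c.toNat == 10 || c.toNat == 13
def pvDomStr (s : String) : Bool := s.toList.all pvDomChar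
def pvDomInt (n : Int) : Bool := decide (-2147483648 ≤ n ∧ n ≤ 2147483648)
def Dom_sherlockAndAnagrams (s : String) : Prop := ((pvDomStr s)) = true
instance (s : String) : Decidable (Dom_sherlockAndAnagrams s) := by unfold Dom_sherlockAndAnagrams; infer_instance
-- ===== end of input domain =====

-- B drops A's hash-bucket-of-multiset-keys + sum of C(v,2) and instead counts anagram
-- pairs directly over pairs of start positions with an incremental signed
-- count-difference dictionary (alternative algorithm; not claimed faster).

-- ===== PORT A =====
-- frozenset(Counter(sub).items())
def pvKeyA (sub : List Char) : List (Char × Int) :=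
  PySem.Set.ofList (PySem.Dict.counter sub).items

-- Python dict with frozenset keys, ported by hand: lookup/assignment compare keys by
-- PySem.Set.equal (exact: Python compares frozensets by set equality; first match).
-- pvBGet is bucket.get(key, 0); pvBIns is bucket[key] = v (overwrite in place, else append).
def pvBGet (b : List (List (Char × Int) × Int)) (k : List (Char × Int)) : Int :=
  match b with
  | [] => 0
  | (k', v) :: rest => if PySem.Set.equal k' k then v else pvBGet rest k

def pvBIns (b : List (List (Char × Int) × Int)) (k : List (Char × Int)) (v : Int) :
    List (List (Char × Int) × Int) :=
  match b with
  | [] => [(k, v)]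
  | (k', v') :: rest =>
    if PySem.Set.equal k' k then (k', v) :: rest else (k', v') :: pvBIns rest k v

def sherlockAndAnagrams (s : String) : Int :=
  let cs := s.toList
  let n := PySem.Str.len s
  let bucket := (PySem.List.pyRange 0 n 1).foldl (fun b i =>
    (PySem.List.pyRange 1 (n - i + 1) 1).foldl (fun b j =>
      let key := pvKeyA (PySem.List.slice cs (some i) (some (i + j)))
      pvBIns b key (pvBGet b key + 1)) b) []
  -- ans loop over bucket.keys(); bucket[key] is pvBGet (exact: key always present)
  (bucket.map Prod.fst).foldl (fun ans k =>
    ans + PySem.Int.floordiv (pvBGet bucket k * (pvBGet bucket k - 1)) 2) 0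

-- ===== PORT B =====
def sherlockAndAnagrams_alt (s : String) : Int :=
  let cs := s.toList
  let n := PySem.Str.len s
  (PySem.List.pyRange 0 n 1).foldl (fun ans i =>
    (PySem.List.pyRange (i + 1) n 1).foldl (fun ans j =>
      ((PySem.List.pyRange 0 (n - j) 1).foldl
        (fun (st : Int × PySem.Dict Char Int) l =>
          let a := PySem.List.pyGetD cs (i + l) 'a'
          let d1 := st.2.insert a (st.2.getD a 0 + 1)
          let b := PySem.List.pyGetD cs (j + l) 'a'
          let d2 := d1.insert b (d1.getD b 0 - 1)
          (st.1 + (if d2.values.all (fun v => v == 0) then 1 else 0), d2))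
        (ans, PySem.Dict.empty)).1) ans) 0

-- ===== PRECONDITION & SPEC =====
def Spec_sherlockAndAnagrams (s : String) (out : Int) : Prop := out = sherlockAndAnagrams_alt s
instance (s : String) (out : Int) : Decidable (Spec_sherlockAndAnagrams s out) := by unfold Spec_sherlockAndAnagrams; infer_instance

-- ===== CLAIM (what is proved, stated in full; the proofs are below) =====
def Claim_equal_sherlockAndAnagrams : Prop := ∀ (s : String), Dom_sherlockAndAnagrams s → Spec_sherlockAndAnagrams s (sherlockAndAnagrams s)

-- ===== LEMMAS AND PROOFS =====

-- the substring s[i:i+l] as a list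
def pvSub (cs : List Char) (i l : Nat) : List Char := (cs.drop i).take l

-- Bool: the two substrings have the same Counter-frozenset key (the anagram test)
def keyEq (x y : List Char) : Bool := PySem.Set.equal (pvKeyA x) (pvKeyA y)

def bInd (x y : List Char) : Int := if keyEq x y then 1 else 0

-- the common counting target: for starts i < j, the number of lengths 1..n-j at
-- which the two substrings are anagrams
def pvC (cs : List Char) (i j : Nat) : Int :=
  ((List.range (cs.length - j)).map
    (fun l => bInd (pvSub cs i (l + 1)) (pvSub cs j (l + 1)))).sum

def bTerm (cs : List Char) (i : Nat) : Int :=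
  ((List.range (cs.length - (i + 1))).map (fun k => pvC cs i (i + 1 + k))).sum

-- the row of keys for one start index: substrings of lengths 1..m
def pvRow (d : List Char) (m : Nat) : List (List Char) :=
  (List.range m).map (fun k => d.take (k + 1))

def subsL (cs : List Char) : List (List Char) :=
  (List.range cs.length).flatMap (fun i => pvRow (cs.drop i) (cs.length - i))

-- number of unordered anagram pairs in a list of substrings
def pairsA : List (List Char) → Int
  | [] => 0
  | x :: t => (t.countP (fun y => keyEq y x) : Int) + pairsA t

def crossA (l1 l2 : List (List Char)) : Int :=
  (l1.map (fun x => (l2.countP (fun y => keyEq y x) : Int))).sum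

-- A's bucket built by folding the assignment step over a list of substrings
def stepA (b : List (List (Char × Int) × Int)) (sub : List Char) :
    List (List (Char × Int) × Int) :=
  pvBIns b (pvKeyA sub) (pvBGet b (pvKeyA sub) + 1)

def buildB (l : List (List Char)) : List (List (Char × Int) × Int) := l.foldl stepA []

def sumC (b : List (List (Char × Int) × Int)) : Int :=
  (b.map (fun p => PySem.Int.floordiv (p.2 * (p.2 - 1)) 2)).sum

-- bucket keys pairwise distinct under frozenset equality
def PNE (b : List (List (Char × Int) × Int)) : Prop :=
  b.Pairwise (fun p q => PySem.Set.equal p.1 q.1 = false)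

-- B's inner-loop step, after the Int indices are turned into Nat ones
def stepB (cs : List Char) (i j : Nat) (st : Int × PySem.Dict Char Int) (l : Nat) :
    Int × PySem.Dict Char Int :=
  let a := cs.getD (i + l) 'a'
  let d1 := st.2.insert a (st.2.getD a 0 + 1)
  let b := cs.getD (j + l) 'a'
  let d2 := d1.insert b (d1.getD b 0 - 1)
  (st.1 + (if d2.values.all (fun v => v == 0) then 1 else 0), d2)

-- ----- Set.equal is an equivalence -----

theorem sequal_refl {α : Type} [BEq α] [LawfulBEq α] (a : List α) : PySem.Set.equal a a = true := by
  rw [PySem.Set.equal_iff]; intro x; rfl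

theorem sequal_symm {α : Type} [BEq α] [LawfulBEq α] (a b : List α) :
    PySem.Set.equal a b = PySem.Set.equal b a := by
  rw [Bool.eq_iff_iff, PySem.Set.equal_iff, PySem.Set.equal_iff]
  exact ⟨fun h x => (h x).symm, fun h x => (h x).symm⟩

theorem sequal_trans {α : Type} [BEq α] [LawfulBEq α] {a b c : List α}
    (h1 : PySem.Set.equal a b = true) (h2 : PySem.Set.equal b c = true) :
    PySem.Set.equal a c = true := by
  rw [PySem.Set.equal_iff] at *
  intro x; exact (h1 x).trans (h2 x)

-- keyEq tests per-character-count equality of the substrings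
theorem mem_items_counter (l : List Char) (c : Char) (v : Int) :
    (c, v) ∈ (PySem.Dict.counter l).items ↔ c ∈ l ∧ v = (l.count c : Int) := by
  rw [PySem.Dict.items_counter]
  constructor
  · intro h
    rcases List.mem_map.mp h with ⟨k, hk, hkv⟩
    obtain ⟨rfl, rfl⟩ : k = c ∧ (l.count k : Int) = v :=
      ⟨congrArg Prod.fst hkv, congrArg Prod.snd hkv⟩
    exact ⟨(PySem.Set.mem_ofList _ _).mp hk, rfl⟩
  · rintro ⟨hc, rfl⟩
    exact List.mem_map.mpr ⟨c, (PySem.Set.mem_ofList _ _).mpr hc, rfl⟩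

theorem keyA_eq_items (sub : List Char) :
    pvKeyA sub = (PySem.Dict.counter sub).items := by
  unfold pvKeyA
  rw [PySem.Dict.items_counter]
  apply PySem.Set.ofList_eq_self_of_nodup
  exact (PySem.Set.nodup_ofList sub).map (fun a b h => by simpa using congrArg Prod.fst h)

theorem keyEq_iff_counts (x y : List Char) :
    keyEq x y = true ↔ ∀ c : Char, x.count c = y.count c := by
  unfold keyEq
  rw [keyA_eq_items, keyA_eq_items, PySem.Set.equal_iff]
  constructor
  · intro h c
    by_cases hcx : c ∈ x
    · have h1 := (h (c, (x.count c : Int))).mp ((mem_items_counter x c _).mpr ⟨hcx, rfl⟩)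
      exact_mod_cast ((mem_items_counter y c _).mp h1).2
    · by_cases hcy : c ∈ y
      · have h1 := (h (c, (y.count c : Int))).mpr ((mem_items_counter y c _).mpr ⟨hcy, rfl⟩)
        exact absurd ((mem_items_counter x c _).mp h1).1 hcx
      · simp [List.count_eq_zero_of_not_mem hcx, List.count_eq_zero_of_not_mem hcy]
  · intro h p
    obtain ⟨c, v⟩ := p
    have hmem : c ∈ x ↔ c ∈ y := by
      rw [← List.count_pos_iff, ← List.count_pos_iff, h c]
    rw [mem_items_counter, mem_items_counter, h c, hmem]

theorem keyEq_length {x y : List Char} (h : keyEq x y = true) : x.length = y.length := by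
  have hm : (x : Multiset Char) = (y : Multiset Char) := by
    apply Multiset.ext.mpr
    intro c
    simpa using (keyEq_iff_counts x y).mp h c
  simpa using congrArg Multiset.card hm

theorem keyEq_symm (x y : List Char) : keyEq x y = keyEq y x := sequal_symm _ _

-- ----- A's bucket: lookup / assignment / value sum -----

theorem pvBGet_pvBIns (b : List (List (Char × Int) × Int)) (k k2 : List (Char × Int)) (v : Int) :
    pvBGet (pvBIns b k v) k2 =
      if PySem.Set.equal k k2 then v else pvBGet b k2 := by
  induction b with
  | nil => simp [pvBIns, pvBGet]
  | cons q t ih =>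
    obtain ⟨k', v'⟩ := q
    cases hc : PySem.Set.equal k' k with
    | true =>
      cases h2 : PySem.Set.equal k k2 with
      | true =>
        have h3 := sequal_trans hc h2
        simp [pvBIns, pvBGet, hc, h3]
      | false =>
        have h3 : PySem.Set.equal k' k2 = false := by
          cases h4 : PySem.Set.equal k' k2 with
          | true =>
            have h5 : PySem.Set.equal k k' = true := by rw [sequal_symm]; exact hc
            have := sequal_trans h5 h4
            rw [h2] at this; exact absurd this (by simp)
          | false => rfl
        simp [pvBIns, pvBGet, hc, h3]
    | false =>
      cases h2 : PySem.Set.equal k' k2 with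
      | true =>
        have h3 : PySem.Set.equal k k2 = false := by
          cases h4 : PySem.Set.equal k k2 with
          | true =>
            have h5 : PySem.Set.equal k2 k = true := by rw [sequal_symm]; exact h4
            have := sequal_trans h2 h5
            rw [hc] at this; exact absurd this (by simp)
          | false => rfl
        simp [pvBIns, pvBGet, hc, h2, h3]
      | false =>
        simp [pvBIns, pvBGet, hc, h2, ih]

theorem pvCsucc (v : Int) :
    PySem.Int.floordiv ((v + 1) * (v + 1 - 1)) 2 = PySem.Int.floordiv (v * (v - 1)) 2 + v := by
  have h : (v + 1) * (v + 1 - 1) = v * (v - 1) + v * 2 := by ring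
  simp only [PySem.Int.floordiv, h]
  exact Int.add_mul_fdiv_right _ _ (by norm_num)

theorem sumC_pvBIns (b : List (List (Char × Int) × Int)) (k : List (Char × Int)) :
    sumC (pvBIns b k (pvBGet b k + 1)) = sumC b + pvBGet b k := by
  induction b with
  | nil => norm_num [pvBIns, pvBGet, sumC, PySem.Int.floordiv]
  | cons q t ih =>
    obtain ⟨k', v'⟩ := q
    cases hc : PySem.Set.equal k' k with
    | true =>
      simp only [pvBIns, pvBGet, hc, if_true, sumC, List.map_cons, List.sum_cons]
      rw [pvCsucc]
      omega
    | false =>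
      simp only [pvBIns, pvBGet, hc, Bool.false_eq_true, if_false, sumC, List.map_cons,
        List.sum_cons] at ih ⊢
      omega

theorem keys_pvBIns (b : List (List (Char × Int) × Int)) (k : List (Char × Int)) (v : Int) :
    ∀ q ∈ pvBIns b k v, q.1 ∈ b.map Prod.fst ∨ q.1 = k := by
  induction b with
  | nil => simp [pvBIns]
  | cons p t ih =>
    obtain ⟨k', v'⟩ := p
    cases hc : PySem.Set.equal k' k with
    | true =>
      simp only [pvBIns, hc, if_true]
      intro q hq
      rcases List.mem_cons.mp hq with h | h
      · subst h; left; simp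
      · left; simp only [List.map_cons, List.mem_cons]; right
        exact List.mem_map.mpr ⟨q, h, rfl⟩
    | false =>
      simp only [pvBIns, hc, Bool.false_eq_true, if_false]
      intro q hq
      rcases List.mem_cons.mp hq with h | h
      · subst h; left; simp
      · rcases ih q h with h2 | h2
        · left; simp only [List.map_cons, List.mem_cons]; right; exact h2
        · right; exact h2

theorem PNE_pvBIns {b : List (List (Char × Int) × Int)} {k : List (Char × Int)} {v : Int}
    (h : PNE b) : PNE (pvBIns b k v) := by
  induction b with
  | nil =>
    unfold PNE
    simp [pvBIns]
  | cons p t ih =>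
    obtain ⟨k', v'⟩ := p
    rcases List.pairwise_cons.mp h with ⟨hhead, htail⟩
    cases hc : PySem.Set.equal k' k with
    | true =>
      unfold PNE
      simp only [pvBIns, hc, if_true]
      exact List.pairwise_cons.mpr ⟨fun q hq => hhead q hq, htail⟩
    | false =>
      unfold PNE
      simp only [pvBIns, hc, Bool.false_eq_true, if_false]
      refine List.pairwise_cons.mpr ⟨?_, ih htail⟩
      intro q hq
      rcases keys_pvBIns t k v q hq with h2 | h2
      · rcases List.mem_map.mp h2 with ⟨p0, hp0, hp0k⟩
        rw [← hp0k]
        exact hhead p0 hp0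
      · rw [h2]; exact hc

theorem buildB_append_singleton (l : List (List Char)) (x : List Char) :
    buildB (l ++ [x]) = stepA (buildB l) x := by
  unfold buildB
  rw [List.foldl_append]
  rfl

theorem PNE_buildB (l : List (List Char)) : PNE (buildB l) := by
  induction l using List.reverseRecOn with
  | nil => unfold PNE buildB; simp
  | append_singleton l x ih =>
    rw [buildB_append_singleton]
    exact PNE_pvBIns ih

theorem pvBGet_buildB (l : List (List Char)) (x : List Char) :
    pvBGet (buildB l) (pvKeyA x) = (l.countP (fun y => keyEq y x) : Int) := by
  induction l using List.reverseRecOn generalizing x with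
  | nil => simp [buildB, pvBGet]
  | append_singleton l z ih =>
    rw [buildB_append_singleton]
    unfold stepA
    rw [pvBGet_pvBIns, List.countP_append]
    cases hc : PySem.Set.equal (pvKeyA z) (pvKeyA x) with
    | true =>
      have hcong : l.countP (fun y => keyEq y z) = l.countP (fun y => keyEq y x) := by
        apply List.countP_congr
        intro y _
        constructor
        · intro h; exact sequal_trans h hc
        · intro h
          have h5 : PySem.Set.equal (pvKeyA x) (pvKeyA z) = true := by
            rw [sequal_symm]; exact hc
          exact sequal_trans h h5
      rw [ih]
      have : List.countP (fun y => keyEq y x) [z] = 1 := by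
        simp [keyEq, hc]
      rw [this]
      push_cast
      rw [hcong]
      simp
    | false =>
      simp only [Bool.false_eq_true, if_false, ih]
      have : List.countP (fun y => keyEq y x) [z] = 0 := by
        simp [keyEq, hc]
      rw [this]
      push_cast
      ring

theorem pairsA_append_singleton (l : List (List Char)) (x : List Char) :
    pairsA (l ++ [x]) = pairsA l + (l.countP (fun y => keyEq y x) : Int) := by
  induction l with
  | nil => simp [pairsA]
  | cons x0 t ih =>
    show pairsA (x0 :: (t ++ [x])) = _
    unfold pairsA
    rw [List.countP_append, ih]
    have h1 : List.countP (fun y => keyEq y x0) [x] = if keyEq x0 x then 1 else 0 := by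
      simp only [List.countP_cons, List.countP_nil, keyEq_symm x x0, zero_add]
    have h2 : List.countP (fun y => keyEq y x) (x0 :: t)
        = (if keyEq x0 x then 1 else 0) + List.countP (fun y => keyEq y x) t := by
      simp [List.countP_cons]
      split_ifs <;> omega
    rw [h1, h2]
    push_cast
    split_ifs <;> ring

theorem sumC_buildB (l : List (List Char)) : sumC (buildB l) = pairsA l := by
  induction l using List.reverseRecOn with
  | nil => simp [buildB, sumC, pairsA]
  | append_singleton l x ih =>
    rw [buildB_append_singleton]
    unfold stepA
    rw [sumC_pvBIns, ih, pvBGet_buildB, pairsA_append_singleton]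

-- A's final loop over bucket.keys() equals the value sum
theorem get_skip {pre rest : List (List (Char × Int) × Int)} {k : List (Char × Int)}
    (h : ∀ p ∈ pre, PySem.Set.equal p.1 k = false) :
    pvBGet (pre ++ rest) k = pvBGet rest k := by
  induction pre with
  | nil => rfl
  | cons q t ih =>
    obtain ⟨k', v'⟩ := q
    have h1 : PySem.Set.equal k' k = false := h (k', v') (by simp)
    simp only [List.cons_append, pvBGet, h1, Bool.false_eq_true, if_false]
    exact ih (fun p hp => h p (List.mem_cons_of_mem _ hp))

theorem sum_keys (g : Int → Int) :
    ∀ (bA pre : List (List (Char × Int) × Int)), PNE (pre ++ bA) → ∀ acc : Int,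
      (bA.map Prod.fst).foldl (fun ans k => ans + g (pvBGet (pre ++ bA) k)) acc =
      (bA.map Prod.snd).foldl (fun ans v => ans + g v) acc := by
  intro bA
  induction bA with
  | nil => intro pre _ acc; rfl
  | cons p t ih =>
    intro pre hpne acc
    obtain ⟨k0, v0⟩ := p
    rcases List.pairwise_append.mp hpne with ⟨hpre, hcons, hrel⟩
    have hskip : ∀ q ∈ pre, PySem.Set.equal q.1 k0 = false :=
      fun q hq => hrel q hq (k0, v0) (by simp)
    have hget : pvBGet (pre ++ (k0, v0) :: t) k0 = v0 := by
      rw [get_skip hskip]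
      simp [pvBGet, sequal_refl]
    rw [List.map_cons, List.map_cons, List.foldl_cons, List.foldl_cons, hget]
    have hre : pre ++ (k0, v0) :: t = (pre ++ [(k0, v0)]) ++ t := by
      rw [List.append_assoc]; rfl
    rw [hre] at hpne ⊢
    exact ih (pre ++ [(k0, v0)]) hpne (acc + g v0)

-- ----- pairsA of the flattened rows -----

theorem crossA_cons (x : List Char) (t l2 : List (List Char)) :
    crossA (x :: t) l2 = (l2.countP (fun y => keyEq y x) : Int) + crossA t l2 := by
  simp [crossA]

theorem pairsA_append (l1 l2 : List (List Char)) :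
    pairsA (l1 ++ l2) = pairsA l1 + pairsA l2 + crossA l1 l2 := by
  induction l1 with
  | nil => simp [pairsA, crossA]
  | cons x t ih =>
    show pairsA (x :: (t ++ l2)) = _
    simp only [pairsA]
    rw [List.countP_append, ih, crossA_cons]
    push_cast
    ring

theorem pairsA_zero_of_pairwise {l : List (List Char)}
    (h : l.Pairwise (fun a b => keyEq b a = false)) : pairsA l = 0 := by
  induction l with
  | nil => rfl
  | cons x t ih =>
    rcases List.pairwise_cons.mp h with ⟨hhead, htail⟩
    have hz : t.countP (fun y => keyEq y x) = 0 :=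
      List.countP_eq_zero.mpr (fun y hy => by rw [hhead y hy]; simp)
    simp only [pairsA, hz, ih htail]
    rfl

theorem pairsA_row (d : List Char) (m : Nat) (hm : m ≤ d.length) : pairsA (pvRow d m) = 0 := by
  apply pairsA_zero_of_pairwise
  apply List.pairwise_iff_getElem.mpr
  intro a b ha hb hab
  have hlen : (pvRow d m).length = m := by simp [pvRow]
  rw [hlen] at ha hb
  have hga : (pvRow d m)[a]'(by rw [hlen]; exact ha) = d.take (a + 1) := by
    simp [pvRow]
  have hgb : (pvRow d m)[b]'(by rw [hlen]; exact hb) = d.take (b + 1) := by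
    simp [pvRow]
  rw [hga, hgb]
  cases hk : keyEq (d.take (b + 1)) (d.take (a + 1)) with
  | false => rfl
  | true =>
    have := keyEq_length hk
    rw [List.length_take, List.length_take] at this
    omega

theorem crossA_append (l1 l2 l3 : List (List Char)) :
    crossA l1 (l2 ++ l3) = crossA l1 l2 + crossA l1 l3 := by
  induction l1 with
  | nil => simp [crossA]
  | cons x t ih =>
    rw [crossA_cons, crossA_cons, crossA_cons, ih, List.countP_append]
    push_cast
    ring

theorem crossA_flatMap (l1 : List (List Char)) (xs : List Nat) (g : Nat → List (List Char)) :
    crossA l1 (xs.flatMap g) = (xs.map (fun x => crossA l1 (g x))).sum := by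
  induction xs with
  | nil =>
    simp only [List.flatMap_nil, List.map_nil, List.sum_nil]
    simp [crossA]
  | cons x t ih =>
    rw [List.flatMap_cons, crossA_append, ih, List.map_cons, List.sum_cons]

theorem countP_range_unique (m k1 : Nat) (q : Nat → Bool)
    (h : ∀ k, k < m → q k = true → k = k1) :
    (List.range m).countP q = if k1 < m ∧ q k1 = true then 1 else 0 := by
  induction m with
  | zero => simp
  | succ m ih =>
    rw [List.range_succ, List.countP_append]
    have ihv := ih (fun k hk hq => h k (by omega) hq)
    have hone : List.countP q [m] = if q m = true then 1 else 0 := by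
      simp [List.countP_cons]
    rw [ihv, hone]
    cases hqm : q m with
    | true =>
      have hk1 : m = k1 := h m (by omega) hqm
      subst hk1
      simp [hqm]
    | false =>
      rw [if_neg (by simp : ¬(false = true)), Nat.add_zero]
      by_cases hq1 : q k1 = true
      · by_cases hlt : k1 < m
        · rw [if_pos ⟨hlt, hq1⟩, if_pos ⟨by omega, hq1⟩]
        · have h5 : ¬(k1 < m ∧ q k1 = true) := fun h6 => hlt h6.1
          have h6 : ¬(k1 < m + 1 ∧ q k1 = true) := by
            rintro ⟨h7, _⟩
            have h8 : k1 = m := by omega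
            subst h8
            rw [hqm] at hq1
            exact absurd hq1 (by simp)
          rw [if_neg h5, if_neg h6]
      · have h5 : ¬(k1 < m ∧ q k1 = true) := fun h6 => hq1 h6.2
        have h6 : ¬(k1 < m + 1 ∧ q k1 = true) := fun h7 => hq1 h7.2
        rw [if_neg h5, if_neg h6]

theorem crossA_rows (cs : List Char) (i j : Nat) (hij : i < j) (hj : j ≤ cs.length) :
    crossA (pvRow (cs.drop i) (cs.length - i)) (pvRow (cs.drop j) (cs.length - j))
      = pvC cs i j := by
  unfold crossA pvRow pvC
  rw [List.map_map]
  have hstep : ∀ k1 ∈ List.range (cs.length - i),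
      (((List.range (cs.length - j)).map (fun k => (cs.drop j).take (k + 1))).countP
        (fun y => keyEq y ((cs.drop i).take (k1 + 1))) : Int)
      = if k1 < cs.length - j
          then bInd (pvSub cs i (k1 + 1)) (pvSub cs j (k1 + 1)) else 0 := by
    intro k1 hk1
    have hk1i : k1 < cs.length - i := List.mem_range.mp hk1
    rw [List.countP_map]
    simp only [Function.comp_def]
    rw [countP_range_unique (cs.length - j) k1
      (fun k => keyEq ((cs.drop j).take (k + 1)) ((cs.drop i).take (k1 + 1)))
      (fun k hk hq => by
        have hl := keyEq_length hq
        rw [List.length_take, List.length_take, List.length_drop, List.length_drop] at hl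
        omega)]
    by_cases hlt : k1 < cs.length - j
    · rw [if_pos hlt]
      unfold bInd pvSub
      rw [keyEq_symm]
      split_ifs with h1 h2 h2 <;> simp_all
    · rw [if_neg hlt, if_neg (by tauto)]
      simp
  rw [List.map_congr_left (fun k1 hk1 => (by
    simp only [Function.comp]
    exact hstep k1 hk1))]
  have hsplit : cs.length - i = (cs.length - j) + ((cs.length - i) - (cs.length - j)) := by
    omega
  rw [hsplit, List.range_add, List.map_append]
  have h2 : ((List.range ((cs.length - i) - (cs.length - j))).map
      (fun k => (cs.length - j) + k)).map (fun k1 => if k1 < cs.length - j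
        then bInd (pvSub cs i (k1 + 1)) (pvSub cs j (k1 + 1)) else (0 : Int))
      = (List.range ((cs.length - i) - (cs.length - j))).map (fun _ => (0 : Int)) := by
    rw [List.map_map]
    apply List.map_congr_left
    intro k _
    simp only [Function.comp]
    rw [if_neg (by omega)]
  have h1 : (List.range (cs.length - j)).map (fun k1 => if k1 < cs.length - j
        then bInd (pvSub cs i (k1 + 1)) (pvSub cs j (k1 + 1)) else (0 : Int))
      = (List.range (cs.length - j)).map
        (fun l => bInd (pvSub cs i (l + 1)) (pvSub cs j (l + 1))) := by
    apply List.map_congr_left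
    intro k hk
    rw [if_pos (List.mem_range.mp hk)]
  rw [List.sum_append, h1, h2]
  simp

theorem pairsA_seq (cs : List Char) : ∀ (m a : Nat), a + m = cs.length →
    pairsA (((List.range m).map (a + ·)).flatMap (fun i => pvRow (cs.drop i) (cs.length - i)))
      = (((List.range m).map (a + ·)).map (bTerm cs)).sum := by
  intro m
  induction m with
  | zero => intro a h; simp [pairsA]
  | succ m ih =>
    intro a h
    have hmap : (List.range (m + 1)).map (a + ·)
        = a :: (List.range m).map ((a + 1) + ·) := by
      rw [List.range_succ_eq_map, List.map_cons, List.map_map]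
      congr 1
      apply List.map_congr_left
      intro k _
      simp [Function.comp, Nat.succ_eq_add_one]
      omega
    rw [hmap, List.flatMap_cons, pairsA_append, List.map_cons, List.sum_cons]
    have hrow : pairsA (pvRow (cs.drop a) (cs.length - a)) = 0 := by
      apply pairsA_row
      rw [List.length_drop]
    have hcross : crossA (pvRow (cs.drop a) (cs.length - a))
        (((List.range m).map ((a + 1) + ·)).flatMap (fun i => pvRow (cs.drop i) (cs.length - i)))
        = bTerm cs a := by
      rw [crossA_flatMap, List.map_map]
      unfold bTerm
      have hn : cs.length - (a + 1) = m := by omega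
      rw [hn]
      apply congrArg
      apply List.map_congr_left
      intro k hk
      have hkm : k < m := List.mem_range.mp hk
      simp only [Function.comp]
      exact crossA_rows cs a ((a + 1) + k) (by omega) (by omega)
    rw [hrow, hcross, ih (a + 1) (by omega)]
    ring

theorem pairsA_subsL (cs : List Char) :
    pairsA (subsL cs) = ((List.range cs.length).map (bTerm cs)).sum := by
  have hid : (List.range cs.length).map ((0 : Nat) + ·) = List.range cs.length := by
    rw [List.map_congr_left (fun k _ => by omega : ∀ k ∈ List.range cs.length, 0 + k = k)]
    exact List.map_id _
  have := pairsA_seq cs cs.length 0 (by omega)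
  rw [hid] at this
  unfold subsL
  exact this

-- ----- A's port computes pairsA (subsL cs) -----

theorem foldl_flatMap' {α β γ : Type} (l : List α) (g : α → List β) (f : γ → β → γ) :
    ∀ init : γ, (l.flatMap g).foldl f init = l.foldl (fun acc x => (g x).foldl f acc) init := by
  induction l with
  | nil => intro init; rfl
  | cons x t ih =>
    intro init
    rw [List.flatMap_cons, List.foldl_append, List.foldl_cons, ih]

theorem portA (s : String) :
    sherlockAndAnagrams s = ((List.range s.toList.length).map (bTerm s.toList)).sum := by
  have hslice : ∀ (i k : ℕ),
      PySem.List.slice s.toList (some (i : Int)) (some ((i : Int) + (1 + (k : Int))))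
        = (s.toList.drop i).take (k + 1) := by
    intro i k
    have h1 : ((i : Int) + (1 + (k : Int))) = (i : Int) + ((k + 1 : ℕ) : Int) := by push_cast; ring
    rw [h1, PySem.List.slice_natCast_add]
  have hbucket : (PySem.List.pyRange 0 (PySem.Str.len s) 1).foldl (fun b i =>
      (PySem.List.pyRange 1 (PySem.Str.len s - i + 1) 1).foldl (fun b j =>
        let key := pvKeyA (PySem.List.slice s.toList (some i) (some (i + j)))
        pvBIns b key (pvBGet b key + 1)) b) []
      = buildB (subsL s.toList) := by
    unfold buildB subsL
    rw [foldl_flatMap']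
    simp only [PySem.Str.len_eq, PySem.List.pyRange_one, List.foldl_map, zero_add,
      add_sub_cancel_right, Int.toNat_sub, sub_zero, Int.toNat_natCast, hslice]
    apply PySem.List.foldl_congr_mem
    intro acc i _
    unfold pvRow
    rw [List.foldl_map]
    rfl
  show (((PySem.List.pyRange 0 (PySem.Str.len s) 1).foldl _ []).map Prod.fst).foldl _ 0 = _
  rw [hbucket]
  have hsum := sum_keys (fun v => PySem.Int.floordiv (v * (v - 1)) 2)
    (buildB (subsL s.toList)) [] (by simpa using PNE_buildB (subsL s.toList)) 0
  simp only [List.nil_append] at hsum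
  show ((buildB (subsL s.toList)).map Prod.fst).foldl _ 0 = _
  rw [hsum, PySem.List.foldl_add, List.map_map, zero_add]
  have : sumC (buildB (subsL s.toList)) = _ := (sumC_buildB (subsL s.toList)).trans
    (pairsA_subsL s.toList)
  rw [← this]
  unfold sumC
  rfl

-- ----- B's inner loop: the difference dictionary -----

theorem pvSub_succ (cs : List Char) (i m : Nat) (h : i + m < cs.length) :
    pvSub cs i (m + 1) = pvSub cs i m ++ [cs.getD (i + m) 'a'] := by
  unfold pvSub
  rw [List.take_add_one]
  congr 1
  have hm : m < (cs.drop i).length := by rw [List.length_drop]; omega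
  rw [List.getElem?_eq_getElem hm]
  simp only [Option.toList_some]
  congr 1
  rw [List.getElem_drop, List.getD_eq_getElem cs 'a' (by omega)]

theorem count_append_singleton (l : List Char) (x c : Char) :
    ((l ++ [x]).count c : Int) = (l.count c : Int) + (if x = c then 1 else 0) := by
  rw [List.count_append]
  push_cast
  congr 1
  simp [List.count_cons]

theorem mem_keys_insert {d : PySem.Dict Char Int} {k : Char} {v : Int} {c : Char}
    (h : c ∈ d.keys ∨ c = k) : c ∈ (d.insert k v).keys := by
  by_cases hc : d.contains k = true
  · rw [PySem.Dict.keys_insert_of_contains _ _ hc]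
    rcases h with h | h
    · exact h
    · subst h
      rw [PySem.Dict.contains_eq_decide_mem_keys] at hc
      exact of_decide_eq_true hc
  · rw [PySem.Dict.keys_insert_of_not_contains _ _ (by simpa using hc)]
    rcases h with h | h
    · exact List.mem_append_left _ h
    · subst h; exact List.mem_append_right _ (by simp)

theorem getD_zero_of_not_mem_keys {d : PySem.Dict Char Int} {c : Char}
    (h : c ∉ d.keys) : d.getD c 0 = 0 := by
  unfold PySem.Dict.getD
  rw [(PySem.Dict.get?_eq_none_iff_not_mem_keys d c).mpr h]
  rfl

theorem diff_getD (d : PySem.Dict Char Int) (a b c : Char) :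
    ((d.insert a (d.getD a 0 + 1)).insert b
      ((d.insert a (d.getD a 0 + 1)).getD b 0 - 1)).getD c 0
      = d.getD c 0 + (if a = c then 1 else 0) - (if b = c then 1 else 0) := by
  rw [PySem.Dict.getD_insert, PySem.Dict.getD_insert, PySem.Dict.getD_insert]
  by_cases hcb : c = b <;> by_cases hca : c = a <;> by_cases hba : b = a <;>
    simp_all [eq_comm]

theorem innerB_inv (cs : List Char) (i j : Nat) (hij : i < j) (a0 : Int) :
    ∀ m : Nat, j + m ≤ cs.length →
      (((List.range m).foldl (stepB cs i j) (a0, PySem.Dict.empty)).1 =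
        a0 + ((List.range m).map
          (fun l => bInd (pvSub cs i (l + 1)) (pvSub cs j (l + 1)))).sum) ∧
      (∀ c : Char, ((List.range m).foldl (stepB cs i j) (a0, PySem.Dict.empty)).2.getD c 0 =
        ((pvSub cs i m).count c : Int) - ((pvSub cs j m).count c : Int)) ∧
      (((List.range m).foldl (stepB cs i j) (a0, PySem.Dict.empty)).2.keys.Nodup) ∧
      (∀ c : Char, c ∈ ((List.range m).foldl (stepB cs i j) (a0, PySem.Dict.empty)).2.keys ∨
        ((pvSub cs i m).count c = 0 ∧ (pvSub cs j m).count c = 0)) := by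
  intro m
  induction m with
  | zero =>
    intro _
    refine ⟨by simp, ?_, ?_, ?_⟩
    · intro c
      simp [pvSub, PySem.Dict.getD_empty]
    · simp [PySem.Dict.keys_empty]
    · intro c
      right
      simp [pvSub]
  | succ m ih =>
    intro hm
    obtain ⟨h1, h2, h3, h4⟩ := ih (by omega)
    set st := (List.range m).foldl (stepB cs i j) (a0, PySem.Dict.empty) with hst
    have hfold : (List.range (m + 1)).foldl (stepB cs i j) (a0, PySem.Dict.empty)
        = stepB cs i j st m := by
      rw [List.range_succ, List.foldl_append, List.foldl_cons, List.foldl_nil]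
    have hsubi := pvSub_succ cs i m (by omega)
    have hsubj := pvSub_succ cs j m (by omega)
    have hstep : stepB cs i j st m =
        (st.1 + (if ((st.2.insert (cs.getD (i + m) 'a') (st.2.getD (cs.getD (i + m) 'a') 0 + 1)).insert
            (cs.getD (j + m) 'a')
            ((st.2.insert (cs.getD (i + m) 'a') (st.2.getD (cs.getD (i + m) 'a') 0 + 1)).getD
              (cs.getD (j + m) 'a') 0 - 1)).values.all (fun v => v == 0) then 1 else 0),
          (st.2.insert (cs.getD (i + m) 'a') (st.2.getD (cs.getD (i + m) 'a') 0 + 1)).insert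
            (cs.getD (j + m) 'a')
            ((st.2.insert (cs.getD (i + m) 'a') (st.2.getD (cs.getD (i + m) 'a') 0 + 1)).getD
              (cs.getD (j + m) 'a') 0 - 1)) := rfl
    have hgd2 : ∀ c, (stepB cs i j st m).2.getD c 0 = st.2.getD c 0
        + (if cs.getD (i + m) 'a' = c then 1 else 0)
        - (if cs.getD (j + m) 'a' = c then 1 else 0) :=
      fun c => diff_getD st.2 (cs.getD (i + m) 'a') (cs.getD (j + m) 'a') c
    have h2' : ∀ c : Char, (stepB cs i j st m).2.getD c 0 =
        ((pvSub cs i (m + 1)).count c : Int) - ((pvSub cs j (m + 1)).count c : Int) := by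
      intro c
      rw [hgd2 c, h2 c, hsubi, hsubj, count_append_singleton, count_append_singleton]
      omega
    have hnodup2 : (stepB cs i j st m).2.keys.Nodup := by
      rw [hstep]
      exact PySem.Dict.nodup_keys_insert _ _ _ (PySem.Dict.nodup_keys_insert _ _ _ h3)
    have hcov : ∀ c : Char, c ∈ (stepB cs i j st m).2.keys ∨
        ((pvSub cs i (m + 1)).count c = 0 ∧ (pvSub cs j (m + 1)).count c = 0) := by
      intro c
      by_cases hca : cs.getD (i + m) 'a' = c
      · left
        rw [hstep]
        exact mem_keys_insert (Or.inl (mem_keys_insert (Or.inr hca.symm)))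
      · by_cases hcb : cs.getD (j + m) 'a' = c
        · left
          rw [hstep]
          exact mem_keys_insert (Or.inr hcb.symm)
        · rcases h4 c with h | h
          · left
            rw [hstep]
            exact mem_keys_insert (Or.inl (mem_keys_insert (Or.inl h)))
          · right
            rw [hsubi, hsubj]
            rw [List.getD_eq_getElem?_getD] at hca hcb
            constructor
            · rw [List.count_append]
              simp [hca, h.1]
            · rw [List.count_append]
              simp [hcb, h.2]
    have hall : ((stepB cs i j st m).2.values.all (fun v => v == 0))
        = keyEq (pvSub cs i (m + 1)) (pvSub cs j (m + 1)) := by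
      rw [Bool.eq_iff_iff]
      constructor
      · intro hv
        rw [keyEq_iff_counts]
        intro c
        have hz : (stepB cs i j st m).2.getD c 0 = 0 := by
          by_cases hck : c ∈ (stepB cs i j st m).2.keys
          · rw [PySem.Dict.values_eq_map_keys _ hnodup2 0, List.all_eq_true] at hv
            have := hv _ (List.mem_map.mpr ⟨c, hck, rfl⟩)
            simpa using this
          · exact getD_zero_of_not_mem_keys hck
        have := h2' c
        omega
      · intro hk
        have hcnts := (keyEq_iff_counts _ _).mp hk
        rw [PySem.Dict.values_eq_map_keys _ hnodup2 0, List.all_eq_true]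
        intro v hv
        rcases List.mem_map.mp hv with ⟨c, hc, rfl⟩
        have hg := h2' c
        have hcc := hcnts c
        simp only [beq_iff_eq]
        omega
    refine ⟨?_, fun c => by rw [hfold]; exact h2' c,
      by rw [hfold]; exact hnodup2, fun c => by rw [hfold]; exact hcov c⟩
    rw [hfold]
    have hfst : (stepB cs i j st m).1 = st.1
        + (if ((stepB cs i j st m).2.values.all (fun v => v == 0)) then 1 else 0) := by
      rw [hstep]
    rw [hfst, hall, h1, List.range_succ, List.map_append, List.sum_append]
    unfold bInd
    simp
    ring

theorem portB (s : String) :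
    sherlockAndAnagrams_alt s = ((List.range s.toList.length).map (bTerm s.toList)).sum := by
  unfold sherlockAndAnagrams_alt
  simp only [PySem.Str.len_eq, PySem.List.pyRange_one, List.foldl_map, zero_add,
    sub_zero, Int.toNat_natCast]
  have e1 : ∀ (a b : ℕ), PySem.List.pyGetD s.toList ((a : Int) + (b : Int)) 'a'
      = s.toList.getD (a + b) 'a' := fun a b => by
    rw [show ((a : Int) + (b : Int)) = ((a + b : ℕ) : Int) by push_cast; ring,
      PySem.List.pyGetD_natCast]
  have e2 : ∀ (a b c : ℕ), PySem.List.pyGetD s.toList ((a : Int) + 1 + (b : Int) + (c : Int)) 'a'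
      = s.toList.getD (a + 1 + b + c) 'a' := fun a b c => by
    rw [show ((a : Int) + 1 + (b : Int) + (c : Int)) = ((a + 1 + b + c : ℕ) : Int) by
      push_cast; ring, PySem.List.pyGetD_natCast]
  have e3 : ∀ (a b : ℕ), (((s.toList.length : Int)) - ((a : Int) + 1 + (b : Int))).toNat
      = s.toList.length - (a + 1 + b) := by intros; omega
  have e4 : ∀ (a : ℕ), (((s.toList.length : Int)) - ((a : Int) + 1)).toNat
      = s.toList.length - (a + 1) := by intros; omega
  simp only [e1, e2, e3, e4]
  have hfin : (List.range s.toList.length).foldl (fun acc i => acc + bTerm s.toList i) 0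
      = (List.map (bTerm s.toList) (List.range s.toList.length)).sum := by
    rw [PySem.List.foldl_add, zero_add]
  rw [← hfin]
  apply PySem.List.foldl_congr_mem
  intro acc i hi
  have hi' : i < s.toList.length := List.mem_range.mp hi
  have hmid : (List.range (s.toList.length - (i + 1))).foldl
      (fun acc k => acc + pvC s.toList i (i + 1 + k)) acc = acc + bTerm s.toList i := by
    rw [PySem.List.foldl_add]
    rfl
  rw [← hmid]
  apply PySem.List.foldl_congr_mem
  intro acc2 k hk
  have hk' : k < s.toList.length - (i + 1) := List.mem_range.mp hk
  exact (innerB_inv s.toList i (i + 1 + k) (by omega) acc2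
    (s.toList.length - (i + 1 + k)) (by omega)).1

-- ===== VERDICT (by name: the statement is the Claim_ definition above) =====
theorem sherlockAndAnagrams_spec : Claim_equal_sherlockAndAnagrams := by
  intro s _
  show sherlockAndAnagrams s = sherlockAndAnagrams_alt s
  rw [portA, portB]
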